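-- pv_equiv track=rewrite | github.com/jk-jung/problem-solving | codewars/6kyu/6_Simple max digit sum.py | solve
-- ===== SOURCE A (Python) =====
-- def solve(n):
--     n = str(n)
--
--     def f(x): return (sum(map(int, x)), int(x))
--     r = [f(n)]
--     pr = ''
--     for i in range(len(n)):
--         if int(n[i]) > 0:
--             r.append(f(pr + str(int(n[i]) - 1) + '9' * (len(n) - i - 1)))
--         pr += n[i]
--
--     return max(r)[1]
-- ===== SOURCE B (Python) =====
-- def _digit_sum(x):
--     return sum(int(c) for c in str(x))
--
--
-- def solve(n):
--     # Recursion over the decimal string: either keep the leading digit and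
--     # recurse on the remainder, or decrement it and fill with nines.
--     s = str(n)
--     if len(s) == 1:
--         return int(s)
--     h = int(s[0])
--     p = 10 ** (len(s) - 1)
--     keep = h * p + solve(int(s[1:]))
--     nines = (h - 1) * p + (p - 1)
--     if (_digit_sum(keep), keep) < (_digit_sum(nines), nines):
--         return nines
--     return keep
-- ===== Notes on version B (the rewrite author's own statement) =====
-- stated objective: alternative
-- what changed: Replaced A's prefix-building loop that materializes every decrement-and-nines candidate string and takes max over the whole list by a recursion on the decimal string that at each level compares just two numeric candidates (keep the leading digit and recurse on the remainder, or decrement it and fill with nines).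
import Mathlib
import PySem

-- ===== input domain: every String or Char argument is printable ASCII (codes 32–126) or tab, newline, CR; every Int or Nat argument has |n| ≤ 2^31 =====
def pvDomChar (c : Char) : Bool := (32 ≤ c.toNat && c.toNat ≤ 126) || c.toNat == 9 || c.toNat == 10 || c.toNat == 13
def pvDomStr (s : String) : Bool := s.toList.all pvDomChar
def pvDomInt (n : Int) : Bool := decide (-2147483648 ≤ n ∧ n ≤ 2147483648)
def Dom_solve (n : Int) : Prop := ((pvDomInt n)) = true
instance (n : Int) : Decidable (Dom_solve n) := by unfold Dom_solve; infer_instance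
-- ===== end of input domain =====

-- B replaces A's prefix-building loop over all decrement-and-nines candidate strings by a
-- two-candidate recursion on the decimal string (objective: alternative, not claimed faster).

-- ===== PORT A =====
-- int(x): under Pre_solve every argument of int() in this program is a nonempty all-digit
-- ASCII string; hand-ported exactly on that domain as the base-10 digit fold (none elsewhere
-- = ValueError; PySem's ofChars? is equivalent there but its parser helper is not tractable in proofs).
def pvChrInt? (c : Char) : Option Int :=
  if '0' ≤ c ∧ c ≤ '9' then some ((c.toNat : Int) - 48) else none

def pvIntDigits? (cs : List Char) : Option Int :=
  if cs ≠ [] ∧ cs.all (fun c => decide ('0' ≤ c ∧ c ≤ '9')) then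
    some (cs.foldl (fun a c => 10 * a + ((c.toNat : Int) - 48)) 0)
  else none

-- Python compares int pairs lexicographically; hand-ported (exact for Int × Int).
def pvLexLt (a b : Int × Int) : Bool :=
  decide (a.1 < b.1 ∨ (a.1 = b.1 ∧ a.2 < b.2))

-- max over a list of int pairs: first element as initial best, strict > to replace
-- (= Python's max, which keeps the first maximum).  [] is unreachable (r starts nonempty).
def pvMaxPairs : List (Int × Int) → Int × Int
  | [] => (0, 0)
  | x :: xs => xs.foldl (fun m y => if pvLexLt m y then y else m) x

-- f(x) = (sum(map(int, x)), int(x))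
def pvF (x : List Char) : Int × Int :=
  ((x.map (fun c => (pvChrInt? c).getD 0)).sum, (pvIntDigits? x).getD 0)

def solve (n : Int) : Int :=
  let s := PySem.Int.toChars n
  let res := (PySem.List.pyRange 0 (s.length : Int) 1).foldl
    (fun (acc : List (Int × Int) × List Char) i =>
      let c := PySem.List.pyGetD s i ' '
      let d := (pvChrInt? c).getD 0
      let r := if 0 < d then
          acc.1 ++ [pvF (acc.2 ++ PySem.Int.toChars (d - 1) ++
                         List.replicate (((s.length : Int) - i - 1)).toNat '9')]
        else acc.1
      (r, acc.2 ++ [c]))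
    ([pvF s], [])
  (pvMaxPairs res.1).2

-- ===== PORT B =====
def pvDigitSum (x : Int) : Int :=
  ((PySem.Int.toChars x).map (fun c => (pvChrInt? c).getD 0)).sum

-- fuel = len(str(n)) suffices: each recursive call shortens the decimal string
-- (fuel 0 is unreachable under Pre_solve; the fuel only makes the recursion total).
def pvSolveGo : Nat → Int → Int
  | 0, _ => 0
  | fuel + 1, n =>
    let s := PySem.Int.toChars n
    if s.length = 1 then (pvIntDigits? s).getD 0
    else
      let h := (pvChrInt? (PySem.List.pyGetD s 0 ' ')).getD 0
      let p : Int := 10 ^ (s.length - 1)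
      let keep := h * p + pvSolveGo fuel ((pvIntDigits? (PySem.List.slice s (some 1) none)).getD 0)
      let nines := (h - 1) * p + (p - 1)
      if pvLexLt (pvDigitSum keep, keep) (pvDigitSum nines, nines) then nines else keep

def solve_alt (n : Int) : Int := pvSolveGo (PySem.Int.toChars n).length n

-- ===== PRECONDITION & SPEC =====
-- Pre_solve excludes exactly the negative n, on which both A and B raise ValueError
-- (int() applied to a string containing '-').
def Pre_solve (n : Int) : Prop := 0 ≤ n
instance (n : Int) : Decidable (Pre_solve n) := by unfold Pre_solve; infer_instance

def pvWitness_solve : Int := 39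

def Spec_solve (n : Int) (out : Int) : Prop := out = solve_alt n
instance (n : Int) (out : Int) : Decidable (Spec_solve n out) := by unfold Spec_solve; infer_instance

-- ===== CLAIM (what is proved, stated in full; the proofs are below) =====
def Claim_equal_solve : Prop := ∀ (n : Int), Dom_solve n → Pre_solve n → Spec_solve n (solve n)

-- ===== LEMMAS AND PROOFS =====

-- digit lists (most significant first)
def pvVal (ds : List Nat) : Nat := ds.foldl (fun a d => 10 * a + d) 0
def pvChars (ds : List Nat) : List Char := ds.map Nat.digitChar
def pvDigits (m : Nat) : List Nat := if m = 0 then [0] else (Nat.digits 10 m).reverse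
def pvP (e : List Nat) : Int × Int := ((e.sum : Int), (pvVal e : Int))
def pvShift (x L : Nat) (q : Int × Int) : Int × Int :=
  ((x : Int) + q.1, (x : Int) * 10 ^ L + q.2)
def pvAux (pre : List Nat) : List Nat → List (Int × Int)
  | [] => []
  | d :: t => (if 0 < d then [pvP (pre ++ (d - 1) :: List.replicate t.length 9)] else [])
      ++ pvAux (pre ++ [d]) t
def pvCands (ds : List Nat) : List (Int × Int) := pvP ds :: pvAux [] ds
def pvLe (a b : Int × Int) : Prop := a.1 < b.1 ∨ (a.1 = b.1 ∧ a.2 ≤ b.2)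

-- value basics
theorem pvVal_foldl (w : List Nat) (a : Nat) :
    w.foldl (fun a d => 10 * a + d) a = a * 10 ^ w.length + pvVal w := by
  induction w generalizing a with
  | nil => simp [pvVal]
  | cons d w ih =>
    simp only [List.foldl_cons, List.length_cons]
    rw [ih, show pvVal (d :: w) = (10 * 0 + d) * 10 ^ w.length + pvVal w from by
      rw [pvVal, List.foldl_cons, ih]]
    ring

theorem pvVal_append (u w : List Nat) :
    pvVal (u ++ w) = pvVal u * 10 ^ w.length + pvVal w := by
  rw [pvVal, List.foldl_append, pvVal_foldl]
  rfl

theorem pvVal_cons (d : Nat) (w : List Nat) :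
    pvVal (d :: w) = d * 10 ^ w.length + pvVal w := by
  have h0 : d :: w = [d] ++ w := rfl
  rw [h0, pvVal_append]
  simp [pvVal]

theorem pvVal_lt (w : List Nat) (h : ∀ d ∈ w, d < 10) : pvVal w < 10 ^ w.length := by
  induction w with
  | nil => simp [pvVal]
  | cons d w ih =>
    have hd : d < 10 := h d (by simp)
    have hw : pvVal w < 10 ^ w.length := ih (fun x hx => h x (by simp [hx]))
    rw [pvVal_cons, List.length_cons, pow_succ]
    nlinarith

theorem pvVal_reverse (l : List Nat) : pvVal l.reverse = Nat.ofDigits 10 l := by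
  induction l with
  | nil => simp [pvVal, Nat.ofDigits]
  | cons x l ih =>
    rw [List.reverse_cons, pvVal_append, Nat.ofDigits_cons, ← ih]
    simp [pvVal]
    ring

theorem pvVal_replicate_nine (L : Nat) : pvVal (List.replicate L 9) = 10 ^ L - 1 := by
  induction L with
  | zero => simp [pvVal]
  | succ L ih =>
    rw [List.replicate_succ, pvVal_cons, List.length_replicate, ih, pow_succ]
    have : 0 < 10 ^ L := by positivity
    omega

-- pvDigits basics
theorem pvDigits_ne_nil (m : Nat) : pvDigits m ≠ [] := by
  unfold pvDigits
  split
  · simp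
  · simp [Nat.digits_ne_nil_iff_ne_zero, *]

theorem pvDigits_lt (m : Nat) : ∀ d ∈ pvDigits m, d < 10 := by
  intro d hd
  unfold pvDigits at hd
  split at hd
  · simp at hd; omega
  · exact Nat.digits_lt_base (by norm_num) (List.mem_reverse.mp hd)

theorem pvDigits_canon (h : Nat) (t : List Nat) (hh : h ≠ 0) (hd : ∀ d ∈ h :: t, d < 10) :
    pvDigits (pvVal (h :: t)) = h :: t := by
  have hv : pvVal (h :: t) = Nat.ofDigits 10 (h :: t).reverse := by
    rw [← pvVal_reverse, List.reverse_reverse]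
  have hne : pvVal (h :: t) ≠ 0 := by
    rw [pvVal_cons]
    have : 0 < 10 ^ t.length := by positivity
    rcases Nat.eq_zero_or_pos h with h0 | h0
    · exact absurd h0 hh
    · positivity
  unfold pvDigits
  rw [if_neg hne, hv, Nat.digits_ofDigits 10 (by norm_num) _
    (fun l hl => hd l (by simpa using (List.mem_reverse.mp hl)))
    (fun _ => by simpa [List.getLast_reverse] using hh)]
  simp

theorem pvDigits_len_le (t : List Nat) (ht : t ≠ []) (hd : ∀ d ∈ t, d < 10) :
    (pvDigits (pvVal t)).length ≤ t.length := by
  unfold pvDigits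
  split
  · simp only [List.length_singleton]
    cases t with
    | nil => exact absurd rfl ht
    | cons a l => simp
  · rw [List.length_reverse, Nat.digits_length_le_iff (by norm_num)]
    exact pvVal_lt t hd

theorem pvToChars_eq (m : Nat) : Nat.toDigits 10 m = pvChars (pvDigits m) := by
  induction m using Nat.strong_induction_on with
  | _ m ih =>
    rcases Nat.eq_zero_or_pos m with h0 | h0
    · subst h0; simp [Nat.toDigits_zero, pvDigits, pvChars]; rfl
    · rw [Nat.toDigits_eq_if (by norm_num)]
      unfold pvDigits
      rw [if_neg (show ¬ m = 0 by omega), Nat.digits_def' (by norm_num) h0]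
      by_cases hlt : m < 10
      · rw [if_pos hlt]
        have : m / 10 = 0 := Nat.div_eq_of_lt hlt
        rw [this]
        simp [pvChars, Nat.mod_eq_of_lt hlt]
      · rw [if_neg hlt]
        have hpos : 0 < m / 10 := Nat.div_pos (by omega) (by norm_num)
        have := ih (m / 10) (Nat.div_lt_self h0 (by norm_num))
        rw [this]
        unfold pvDigits
        rw [if_neg (by omega)]
        simp [pvChars]

theorem pvToChars_int (n : Int) (hn : 0 ≤ n) :
    PySem.Int.toChars n = pvChars (pvDigits n.toNat) := by
  unfold PySem.Int.toChars
  rw [if_neg (by omega), pvToChars_eq]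

-- int() bridges
theorem pvDigitChar_toNat (d : Nat) (hd : d < 10) : (Nat.digitChar d).toNat = d + 48 := by
  interval_cases d <;> decide

theorem pvDigitChar_range (d : Nat) (hd : d < 10) :
    '0' ≤ Nat.digitChar d ∧ Nat.digitChar d ≤ '9' := by
  interval_cases d <;> decide

theorem pvFold_chars (ds : List Nat) (hd : ∀ d ∈ ds, d < 10) : ∀ a : Nat,
    (pvChars ds).foldl (fun a c => 10 * a + ((c.toNat : Int) - 48)) (a : Int)
      = ((ds.foldl (fun a d => 10 * a + d) a : Nat) : Int) := by
  induction ds with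
  | nil => intro a; rfl
  | cons d t ih =>
    intro a
    have hd0 : d < 10 := hd d (by simp)
    simp only [pvChars, List.map_cons, List.foldl_cons]
    rw [pvDigitChar_toNat d hd0]
    have : 10 * (a : Int) + ((((d : Nat) + 48 : Nat) : Int) - 48) = ((10 * a + d : Nat) : Int) := by
      push_cast; ring
    rw [this, ← pvChars]
    exact ih (fun x hx => hd x (by simp [hx])) (10 * a + d)

theorem pvChrInt?_digitChar (d : Nat) (hd : d < 10) :
    pvChrInt? (Nat.digitChar d) = some (d : Int) := by
  interval_cases d <;> decide

theorem pvMapChr (ds : List Nat) (hd : ∀ d ∈ ds, d < 10) :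
    (pvChars ds).map (fun c => (pvChrInt? c).getD 0) = ds.map (Nat.cast : Nat → Int) := by
  induction ds with
  | nil => rfl
  | cons d t ih =>
    simp only [pvChars, List.map_cons]
    rw [pvChrInt?_digitChar d (hd d (by simp)), ← pvChars,
      ih (fun x hx => hd x (by simp [hx]))]
    rfl

theorem pvIntDigits?_chars (ds : List Nat) (hne : ds ≠ []) (hd : ∀ d ∈ ds, d < 10) :
    pvIntDigits? (pvChars ds) = some ((pvVal ds : Nat) : Int) := by
  unfold pvIntDigits?
  rw [if_pos]
  · have := pvFold_chars ds hd 0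
    simp only [Nat.cast_zero] at this
    rw [this]
    rfl
  · constructor
    · simp only [pvChars, ne_eq, List.map_eq_nil_iff]; exact hne
    · rw [List.all_eq_true]
      intro c hc
      simp only [pvChars, List.mem_map] at hc
      obtain ⟨d, hdm, rfl⟩ := hc
      exact decide_eq_true (pvDigitChar_range d (hd d hdm))

theorem pvSum_cast (ds : List Nat) :
    (ds.map (Nat.cast : Nat → Int)).sum = ((ds.sum : Nat) : Int) := by
  induction ds with
  | nil => rfl
  | cons d t ih =>
    simp only [List.map_cons, List.sum_cons, ih]
    push_cast
    ring

theorem pvF_chars (ds : List Nat) (hne : ds ≠ []) (hd : ∀ d ∈ ds, d < 10) :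
    pvF (pvChars ds) = pvP ds := by
  unfold pvF pvP
  rw [pvMapChr ds hd, pvIntDigits?_chars ds hne hd]
  simp only [Option.getD_some]
  congr 1
  exact pvSum_cast ds

-- max machinery
theorem pvLexLt_iff (a b : Int × Int) :
    pvLexLt a b = true ↔ (a.1 < b.1 ∨ (a.1 = b.1 ∧ a.2 < b.2)) := by
  simp [pvLexLt]

theorem pvLe_refl (a : Int × Int) : pvLe a a := by
  obtain ⟨a1, a2⟩ := a; simp [pvLe]

theorem pvLe_trans {a b c : Int × Int} (h1 : pvLe a b) (h2 : pvLe b c) : pvLe a c := by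
  obtain ⟨a1, a2⟩ := a; obtain ⟨b1, b2⟩ := b; obtain ⟨c1, c2⟩ := c
  simp only [pvLe] at *; omega

theorem pvLe_antisymm {a b : Int × Int} (h1 : pvLe a b) (h2 : pvLe b a) : a = b := by
  obtain ⟨a1, a2⟩ := a; obtain ⟨b1, b2⟩ := b
  simp only [pvLe, Prod.mk.injEq] at *; omega

theorem pvLe_of_lexLt_true {a b : Int × Int} (h : pvLexLt a b = true) : pvLe a b := by
  obtain ⟨a1, a2⟩ := a; obtain ⟨b1, b2⟩ := b
  rw [pvLexLt_iff] at h; simp only [pvLe] at *; omega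

theorem pvLe_of_lexLt_false {a b : Int × Int} (h : pvLexLt a b = false) : pvLe b a := by
  obtain ⟨a1, a2⟩ := a; obtain ⟨b1, b2⟩ := b
  have hnot : ¬ ((a1 : Int) < b1 ∨ (a1 = b1 ∧ a2 < b2)) := by simpa [pvLexLt] using h
  simp only [pvLe] at *
  omega

theorem pvFoldMax_spec (xs : List (Int × Int)) : ∀ x : Int × Int,
    (xs.foldl (fun m y => if pvLexLt m y then y else m) x ∈ x :: xs ∧
      ∀ y ∈ x :: xs, pvLe y (xs.foldl (fun m y => if pvLexLt m y then y else m) x)) := by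
  induction xs with
  | nil => intro x; simp [pvLe_refl]
  | cons z zs ih =>
    intro x
    simp only [List.foldl_cons]
    by_cases h : pvLexLt x z = true
    · rw [if_pos h]
      obtain ⟨hm, hb⟩ := ih z
      refine ⟨by rcases List.mem_cons.mp hm with h1 | h1 <;> simp [h1], ?_⟩
      intro y hy
      rcases List.mem_cons.mp hy with rfl | hy
      · exact pvLe_trans (pvLe_of_lexLt_true h) (hb z (by simp))
      · exact hb y hy
    · rw [if_neg h]
      have hf : pvLexLt x z = false := by simpa using h
      obtain ⟨hm, hb⟩ := ih x
      refine ⟨by rcases List.mem_cons.mp hm with h1 | h1 <;> simp [h1], ?_⟩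
      intro y hy
      rcases List.mem_cons.mp hy with rfl | hy
      · exact hb y (by simp)
      · rcases List.mem_cons.mp hy with rfl | hy
        · exact pvLe_trans (pvLe_of_lexLt_false hf) (hb x (by simp))
        · exact hb y (by simp [hy])

theorem pvMaxPairs_spec (x : Int × Int) (xs : List (Int × Int)) :
    pvMaxPairs (x :: xs) ∈ x :: xs ∧ ∀ y ∈ x :: xs, pvLe y (pvMaxPairs (x :: xs)) := by
  have := pvFoldMax_spec xs x
  simpa [pvMaxPairs] using this

theorem pvMaxPairs_eq (x : Int × Int) (xs : List (Int × Int)) (p : Int × Int)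
    (hp : p ∈ x :: xs) (hmax : ∀ y ∈ x :: xs, pvLe y p) : pvMaxPairs (x :: xs) = p := by
  obtain ⟨hm, hb⟩ := pvMaxPairs_spec x xs
  exact pvLe_antisymm (hmax _ hm) (hb p hp)

-- aux structure
theorem pvP_cons (x : Nat) (e : List Nat) : pvP (x :: e) = pvShift x e.length (pvP e) := by
  simp only [pvP, pvShift, List.sum_cons, pvVal_cons, Prod.mk.injEq]
  constructor <;> push_cast <;> ring

theorem pvAux_cons (x : Nat) (t pre : List Nat) :
    pvAux (x :: pre) t = (pvAux pre t).map (pvShift x (pre.length + t.length)) := by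
  induction t generalizing pre with
  | nil => simp [pvAux]
  | cons d t ih =>
    have hlen1 : (pre ++ (d - 1) :: List.replicate t.length 9).length
        = pre.length + (d :: t).length := by
      simp
    have hlen2 : (pre ++ [d]).length + t.length = pre.length + (d :: t).length := by
      simp; omega
    simp only [pvAux, List.map_append]
    congr 1
    · by_cases h0 : 0 < d
      · rw [if_pos h0, if_pos h0]
        simp only [List.map_cons, List.map_nil, List.cons_append]
        rw [pvP_cons, hlen1]
      · rw [if_neg h0, if_neg h0]; rfl
    · have h1 : x :: pre ++ [d] = x :: (pre ++ [d]) := rfl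
      rw [h1, ih, hlen2]

theorem pvCands_mem (ds : List Nat) (hd : ∀ d ∈ ds, d < 10) :
    ∀ q ∈ pvCands ds, ∃ e, e.length = ds.length ∧ (∀ d ∈ e, d < 10) ∧ q = pvP e := by
  have haux : ∀ (t pre : List Nat), (∀ d ∈ pre, d < 10) → (∀ d ∈ t, d < 10) →
      ∀ q ∈ pvAux pre t,
        ∃ e, e.length = pre.length + t.length ∧ (∀ d ∈ e, d < 10) ∧ q = pvP e := by
    intro t
    induction t with
    | nil => intro pre _ _ q hq; simp [pvAux] at hq
    | cons d t ih =>
      intro pre hpre ht q hq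
      simp only [pvAux, List.mem_append] at hq
      rcases hq with hq | hq
      · split at hq
        · simp only [List.mem_singleton] at hq
          refine ⟨pre ++ (d - 1) :: List.replicate t.length 9, ?_, ?_, hq⟩
          · simp only [List.length_append, List.length_cons, List.length_replicate]
          · intro x hx
            simp only [List.mem_append, List.mem_cons, List.mem_replicate] at hx
            rcases hx with hx | hx | hx
            · exact hpre x hx
            · have := ht d (by simp); omega
            · omega
        · simp at hq
      · obtain ⟨e, he1, he2, he3⟩ := ih (pre ++ [d])
          (by intro x hx
              simp only [List.mem_append, List.mem_singleton] at hx
              rcases hx with hx | rfl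
              · exact hpre x hx
              · exact ht x (by simp))
          (fun x hx => ht x (by simp [hx])) q hq
        refine ⟨e, ?_, he2, he3⟩
        rw [he1]
        simp only [List.length_append, List.length_cons, List.length_nil]
        all_goals omega
  intro q hq
  rcases List.mem_cons.mp hq with rfl | hq
  · exact ⟨ds, rfl, hd, rfl⟩
  · simpa using haux ds [] (by simp) hd q hq

theorem pvShift_zero (L : Nat) (q : Int × Int) : pvShift 0 L q = q := by
  obtain ⟨a, b⟩ := q; simp [pvShift]

theorem pvCands_zero_cons (t : List Nat) : pvCands (0 :: t) = pvCands t := by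
  unfold pvCands
  congr 1
  · simp [pvP, pvVal_cons]
  · show pvAux [] (0 :: t) = pvAux [] t
    rw [show pvAux ([] : List Nat) (0 :: t)
        = (if 0 < 0 then [pvP ([] ++ (0 - 1) :: List.replicate t.length 9)] else [])
          ++ pvAux ([] ++ [0]) t from rfl]
    rw [if_neg (lt_irrefl 0), List.nil_append,
      show ([] : List Nat) ++ [0] = 0 :: ([] : List Nat) from rfl, pvAux_cons]
    have hid : pvShift 0 ((List.nil (α := Nat)).length + t.length) = id :=
      funext (fun q => pvShift_zero _ q)
    rw [hid, List.map_id]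

theorem pvStrip_cands (t : List Nat) (ht : t ≠ []) (hd : ∀ d ∈ t, d < 10) :
    pvCands (pvDigits (pvVal t)) = pvCands t := by
  induction t with
  | nil => exact absurd rfl ht
  | cons d t ih =>
    by_cases hd0 : d = 0
    · subst hd0
      rw [pvCands_zero_cons]
      have hv : pvVal (0 :: t) = pvVal t := by rw [pvVal_cons]; simp
      rw [hv]
      cases t with
      | nil => rfl
      | cons a l => exact ih (by simp) (fun x hx => hd x (by simp [hx]))
    · rw [pvDigits_canon d t hd0 hd]

theorem pvStrip_sum (e : List Nat) (hd : ∀ d ∈ e, d < 10) :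
    (pvDigits (pvVal e)).sum = e.sum := by
  induction e with
  | nil => simp [pvVal, pvDigits]
  | cons d t ih =>
    by_cases hd0 : d = 0
    · subst hd0
      have hv : pvVal (0 :: t) = pvVal t := by rw [pvVal_cons]; simp
      rw [hv, List.sum_cons, Nat.zero_add]
      exact ih (fun x hx => hd x (by simp [hx]))
    · rw [pvDigits_canon d t hd0 hd]

theorem pvDigitSum_val (e : List Nat) (hd : ∀ d ∈ e, d < 10) :
    pvDigitSum ((pvVal e : Nat) : Int) = (e.sum : Int) := by
  unfold pvDigitSum
  rw [pvToChars_int _ (Int.natCast_nonneg _), Int.toNat_natCast]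
  rw [pvMapChr _ (pvDigits_lt _), pvSum_cast, pvStrip_sum e hd]

theorem pvGetD_mid (u v : List Char) (x dflt : Char) :
    (u ++ x :: v).getD u.length dflt = x := by
  rw [List.getD_eq_getElem?_getD, List.getElem?_append_right (le_refl _)]
  simp

theorem pvDigits_single (x : Nat) (hx : x < 10) : pvDigits x = [x] := by
  unfold pvDigits
  rcases Nat.eq_zero_or_pos x with h0 | h0
  · simp [h0]
  · rw [if_neg (by omega), Nat.digits_def' (by norm_num) h0,
      Nat.div_eq_of_lt hx, Nat.mod_eq_of_lt hx]
    simp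

-- A-side loop characterization
theorem pvLoopA (ds : List Nat) (hd : ∀ d ∈ ds, d < 10) :
    ∀ (t pre : List Nat) (acc : List (Int × Int)), pre ++ t = ds →
      (PySem.List.pyRange (pre.length : Int) (((pvChars ds).length : Int)) 1).foldl
        (fun (acc : List (Int × Int) × List Char) i =>
          let c := PySem.List.pyGetD (pvChars ds) i ' '
          let d := (pvChrInt? c).getD 0
          let r := if 0 < d then
              acc.1 ++ [pvF (acc.2 ++ PySem.Int.toChars (d - 1) ++
                             List.replicate ((((pvChars ds).length : Int) - i - 1)).toNat '9')]
            else acc.1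
          (r, acc.2 ++ [c]))
        (acc, pvChars pre)
      = (acc ++ pvAux pre t, pvChars ds) := by
  intro t
  induction t with
  | nil =>
    intro pre acc h
    rw [List.append_nil] at h
    subst h
    rw [PySem.List.pyRange_one_eq_nil (by simp [pvChars])]
    simp [pvAux]
  | cons d t ih =>
    intro pre acc h
    have hd' : d < 10 := hd d (by rw [← h]; simp)
    have hlen : ((pvChars ds).length : Int) = (pre.length : Int) + 1 + t.length := by
      rw [← h]; simp [pvChars]; ring
    have hlt : ((pre.length : Nat) : Int) < ((pvChars ds).length : Int) := by
      rw [hlen]; omega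
    have hchars : pvChars ds = pvChars pre ++ Nat.digitChar d :: pvChars t := by
      rw [← h]; simp [pvChars]
    have hc : PySem.List.pyGetD (pvChars ds) ((pre.length : Nat) : Int) ' ' = Nat.digitChar d := by
      rw [PySem.List.pyGetD_natCast, hchars]
      have : pre.length = (pvChars pre).length := by simp [pvChars]
      rw [this, pvGetD_mid]
    have hrep : ((((pvChars ds).length : Int) - ((pre.length : Nat) : Int)) - 1).toNat
        = t.length := by
      rw [hlen]; omega
    have hpr : pvChars pre ++ [Nat.digitChar d] = pvChars (pre ++ [d]) := by
      simp [pvChars]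
    have hnext : ((pre.length : Nat) : Int) + 1 = (((pre ++ [d]).length : Nat) : Int) := by
      simp
    rw [PySem.List.pyRange_one_cons hlt]
    simp only [List.foldl_cons, hc, pvChrInt?_digitChar d hd', Option.getD_some, hrep]
    by_cases h0 : 0 < d
    · have h0' : (0 : Int) < (d : Nat) := by exact_mod_cast h0
      rw [if_pos h0']
      have hd1 : ((d : Nat) : Int) - 1 = (((d - 1 : Nat) : Nat) : Int) := by omega
      rw [hd1, pvToChars_int _ (Int.natCast_nonneg _), Int.toNat_natCast,
        pvDigits_single (d - 1) (by omega)]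
      have harg : pvChars pre ++ pvChars [d - 1] ++ List.replicate t.length '9'
          = pvChars (pre ++ (d - 1) :: List.replicate t.length 9) := by
        simp [pvChars, List.map_replicate]
        exact Or.inr rfl
      have H := ih (pre ++ [d]) (acc ++ [pvP (pre ++ (d - 1) :: List.replicate t.length 9)])
        (by rw [← h]; simp)
      simp only [] at H
      rw [harg, hpr, hnext, pvF_chars (pre ++ (d - 1) :: List.replicate t.length 9)
        (by simp)
        (by intro x hx
            simp only [List.mem_append, List.mem_cons, List.mem_replicate] at hx
            rcases hx with hx | hx | hx
            · exact hd x (by rw [← h]; simp [hx])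
            · omega
            · omega), H]
      rw [show pvAux pre (d :: t)
          = (if 0 < d then [pvP (pre ++ (d - 1) :: List.replicate t.length 9)] else [])
            ++ pvAux (pre ++ [d]) t from rfl, if_pos h0]
      rw [List.append_assoc]
    · have h0' : ¬ (0 : Int) < (d : Nat) := by exact_mod_cast h0
      rw [if_neg h0']
      have H := ih (pre ++ [d]) acc (by rw [← h]; simp)
      simp only [] at H
      rw [hpr, hnext, H]
      rw [show pvAux pre (d :: t)
          = (if 0 < d then [pvP (pre ++ (d - 1) :: List.replicate t.length 9)] else [])
            ++ pvAux (pre ++ [d]) t from rfl, if_neg h0]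
      simp

theorem solveA_char (n : Int) (hn : 0 ≤ n) :
    solve n = (pvMaxPairs (pvCands (pvDigits n.toNat))).2 := by
  unfold solve
  rw [pvToChars_int n hn]
  have H := pvLoopA (pvDigits n.toNat) (pvDigits_lt _) (pvDigits n.toNat) []
    [pvF (pvChars (pvDigits n.toNat))] (by simp)
  simp only [List.length_nil, Nat.cast_zero] at H
  rw [pvF_chars _ (pvDigits_ne_nil _) (pvDigits_lt _)] at H
  simp only []
  rw [show pvChars ([] : List Nat) = [] from rfl] at H
  rw [pvF_chars _ (pvDigits_ne_nil _) (pvDigits_lt _), H]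
  rfl

theorem pvShift_mono (x L : Nat) {a b : Int × Int} (hab : pvLe a b) :
    pvLe (pvShift x L a) (pvShift x L b) := by
  obtain ⟨a1, a2⟩ := a; obtain ⟨b1, b2⟩ := b
  simp only [pvLe, pvShift] at *
  omega

theorem pvDigits_head_pos (m : Nat) (hm : m ≠ 0) (h1 : Nat) (t : List Nat)
    (hds : pvDigits m = h1 :: t) : 0 < h1 := by
  unfold pvDigits at hds
  rw [if_neg hm] at hds
  have hne : Nat.digits 10 m ≠ [] := Nat.digits_ne_nil_iff_ne_zero.mpr hm
  have h2 : (Nat.digits 10 m).getLast hne = h1 := by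
    have : (Nat.digits 10 m).reverse.head? = some h1 := by rw [hds]; rfl
    rw [List.head?_reverse] at this
    rwa [List.getLast?_eq_some_getLast hne, Option.some_inj] at this
  have h3 : (Nat.digits 10 m).getLast hne ≠ 0 := Nat.getLast_digit_ne_zero 10 hm
  omega

theorem pvDigits_two_le (m : Nat) (hm : 10 ≤ m) : 2 ≤ (pvDigits m).length := by
  unfold pvDigits
  rw [if_neg (by omega), List.length_reverse]
  by_contra hcon
  have hle : (Nat.digits 10 m).length ≤ 1 := by omega
  rw [Nat.digits_length_le_iff (by norm_num)] at hle
  omega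

theorem pvMain (fuel : Nat) (m : Nat) (hf : (pvDigits m).length ≤ fuel) :
    pvSolveGo fuel (m : Int) = (pvMaxPairs (pvCands (pvDigits m))).2 := by
  induction fuel generalizing m with
  | zero =>
    exact absurd (List.eq_nil_of_length_eq_zero (Nat.le_zero.mp hf)) (pvDigits_ne_nil m)
  | succ fuel ih =>
    rw [pvSolveGo]
    simp only []
    rw [pvToChars_int _ (Int.natCast_nonneg _), Int.toNat_natCast]
    by_cases hm : m < 10
    · -- single digit
      rw [pvDigits_single m hm]
      rw [if_pos (by simp [pvChars])]
      rw [pvIntDigits?_chars [m] (by simp) (by simpa using hm)]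
      simp only [Option.getD_some]
      rcases Nat.eq_zero_or_pos m with rfl | hm0
      · decide
      · have hcl : pvCands [m] = [pvP [m], pvP [m - 1]] := by
          show pvP [m] :: pvAux [] [m] = _
          rw [show pvAux ([] : List Nat) [m]
              = (if 0 < m then [pvP (([] : List Nat) ++ (m - 1) :: List.replicate ([] : List Nat).length 9)] else [])
                ++ pvAux ([] ++ [m]) ([] : List Nat) from rfl]
          rw [if_pos hm0]
          rfl
        rw [hcl, pvMaxPairs_eq (pvP [m]) [pvP [m - 1]] (pvP [m]) (by simp)
          (by intro y hy
              rcases List.mem_cons.mp hy with rfl | hy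
              · exact pvLe_refl _
              · rcases List.mem_singleton.mp hy with rfl
                simp only [pvP, pvLe, pvVal, List.sum_cons, List.sum_nil, List.foldl]
                omega)]
        rfl
    · -- at least two digits
      have hm0 : m ≠ 0 := by omega
      obtain ⟨h1, t, hds⟩ : ∃ h1 t, pvDigits m = h1 :: t := by
        cases hcase : pvDigits m with
        | nil => exact absurd hcase (pvDigits_ne_nil m)
        | cons a l => exact ⟨a, l, rfl⟩
      have hall : ∀ d ∈ h1 :: t, d < 10 := by rw [← hds]; exact pvDigits_lt m
      have hh1 : 0 < h1 := pvDigits_head_pos m hm0 h1 t hds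
      have h2le := pvDigits_two_le m (by omega)
      have htne : t ≠ [] := by
        rw [hds] at h2le
        cases t
        · simp at h2le
        · simp
      have htl : ∀ d ∈ t, d < 10 := fun d hd2 => hall d (by simp [hd2])
      rw [hds]
      rw [if_neg (by
        simp only [pvChars, List.length_map, List.length_cons]
        cases t
        · exact absurd rfl htne
        · simp)]
      have hcons : pvChars (h1 :: t) = Nat.digitChar h1 :: pvChars t := rfl
      rw [hcons, PySem.List.pyGetD_zero_cons, pvChrInt?_digitChar h1 (hall h1 (by simp)), ← hcons]
      simp only [Option.getD_some]
      rw [PySem.List.slice_from_one, hcons]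
      simp only [List.tail_cons]
      rw [pvIntDigits?_chars t htne htl]
      simp only [Option.getD_some]
      have hlen' : (pvDigits (pvVal t)).length ≤ fuel := by
        have h3 := pvDigits_len_le t htne htl
        have hft : (pvDigits m).length ≤ fuel + 1 := hf
        rw [hds] at hft
        simp only [List.length_cons] at hft
        omega
      rw [ih (pvVal t) hlen', pvStrip_cands t htne htl]
      have hslen : (Nat.digitChar h1 :: pvChars t).length - 1 = t.length := by
        simp [pvChars]
      rw [hslen]
      -- abbreviations
      have hspec := pvMaxPairs_spec (pvP t) (pvAux [] t)
      have hmem : pvMaxPairs (pvCands t) ∈ pvCands t := hspec.1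
      have hbnd : ∀ y ∈ pvCands t, pvLe y (pvMaxPairs (pvCands t)) := hspec.2
      obtain ⟨e, helen, helt, heq⟩ := pvCands_mem t htl _ hmem
      have hApvP : pvShift h1 t.length (pvMaxPairs (pvCands t)) = pvP (h1 :: e) := by
        rw [heq, ← helen, ← pvP_cons]
      have halle : ∀ x ∈ h1 :: e, x < 10 := by
        intro x hx
        rcases List.mem_cons.mp hx with rfl | hx
        · exact hall x (by simp)
        · exact helt x hx
      have hallN : ∀ x ∈ (h1 - 1) :: List.replicate t.length 9, x < 10 := by
        intro x hx
        rcases List.mem_cons.mp hx with rfl | hx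
        · have := hall h1 (by simp); omega
        · rw [List.eq_of_mem_replicate hx]; omega
      have hkeep : (h1 : Int) * 10 ^ t.length + (pvMaxPairs (pvCands t)).2
          = (pvShift h1 t.length (pvMaxPairs (pvCands t))).2 := rfl
      have hnines : ((h1 : Int)) * 10 ^ t.length - 1 * 10 ^ t.length + (10 ^ t.length - 1)
          = (pvP ((h1 - 1) :: List.replicate t.length 9)).2 := by
        show _ = ((pvVal ((h1 - 1) :: List.replicate t.length 9) : Nat) : Int)
        rw [pvVal_cons, pvVal_replicate_nine, List.length_replicate]
        have hp : (1 : Nat) ≤ 10 ^ t.length := Nat.one_le_pow _ _ (by norm_num)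
        rw [Nat.cast_add, Nat.cast_mul, Nat.cast_sub hh1, Nat.cast_sub hp]
        push_cast
        ring
      have hds1 : pvDigitSum ((pvShift h1 t.length (pvMaxPairs (pvCands t))).2)
          = (pvShift h1 t.length (pvMaxPairs (pvCands t))).1 := by
        rw [hApvP]
        show pvDigitSum ((pvVal (h1 :: e) : Nat) : Int) = (((h1 :: e).sum : Nat) : Int)
        exact pvDigitSum_val _ halle
      have hds2 : pvDigitSum ((pvP ((h1 - 1) :: List.replicate t.length 9)).2)
          = (pvP ((h1 - 1) :: List.replicate t.length 9)).1 := by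
        show pvDigitSum ((pvVal _ : Nat) : Int) = _
        exact pvDigitSum_val _ hallN
      -- structure of the candidate list of h1 :: t
      have hstruct : pvCands (h1 :: t) = pvP (h1 :: t) :: pvP ((h1 - 1) :: List.replicate t.length 9)
          :: (pvAux [] t).map (pvShift h1 t.length) := by
        show pvP (h1 :: t) :: pvAux [] (h1 :: t) = _
        rw [show pvAux ([] : List Nat) (h1 :: t)
            = (if 0 < h1 then [pvP (([] : List Nat) ++ (h1 - 1) :: List.replicate t.length 9)] else [])
              ++ pvAux ([] ++ [h1]) t from rfl]
        rw [if_pos hh1, show ([] : List Nat) ++ [h1] = h1 :: ([] : List Nat) from rfl, pvAux_cons]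
        simp
      have hmax : pvMaxPairs (pvCands (h1 :: t))
          = if pvLexLt (pvShift h1 t.length (pvMaxPairs (pvCands t)))
                (pvP ((h1 - 1) :: List.replicate t.length 9))
            then pvP ((h1 - 1) :: List.replicate t.length 9)
            else pvShift h1 t.length (pvMaxPairs (pvCands t)) := by
        rw [hstruct]
        apply pvMaxPairs_eq
        · by_cases hc : pvLexLt (pvShift h1 t.length (pvMaxPairs (pvCands t)))
              (pvP ((h1 - 1) :: List.replicate t.length 9)) = true
          · rw [if_pos hc]; simp
          · rw [if_neg hc]
            rcases List.mem_cons.mp hmem with hM | hM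
            · rw [hM, ← pvP_cons]
              simp
            · refine List.mem_cons.mpr (Or.inr (List.mem_cons.mpr (Or.inr ?_)))
              exact List.mem_map.mpr ⟨_, hM, rfl⟩
        · intro y hy
          have hR : pvLe (pvShift h1 t.length (pvMaxPairs (pvCands t)))
              (if pvLexLt (pvShift h1 t.length (pvMaxPairs (pvCands t)))
                    (pvP ((h1 - 1) :: List.replicate t.length 9))
                then pvP ((h1 - 1) :: List.replicate t.length 9)
                else pvShift h1 t.length (pvMaxPairs (pvCands t))) := by
            by_cases hc : pvLexLt (pvShift h1 t.length (pvMaxPairs (pvCands t)))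
                (pvP ((h1 - 1) :: List.replicate t.length 9)) = true
            · rw [if_pos hc]; exact pvLe_of_lexLt_true hc
            · rw [if_neg hc]; exact pvLe_refl _
          rcases List.mem_cons.mp hy with rfl | hy
          · refine pvLe_trans ?_ hR
            rw [pvP_cons]
            exact pvShift_mono _ _ (hbnd (pvP t) (List.mem_cons.mpr (Or.inl rfl)))
          · rcases List.mem_cons.mp hy with rfl | hy
            · by_cases hc : pvLexLt (pvShift h1 t.length (pvMaxPairs (pvCands t)))
                  (pvP ((h1 - 1) :: List.replicate t.length 9)) = true
              · rw [if_pos hc]; exact pvLe_refl _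
              · rw [if_neg hc]
                exact pvLe_of_lexLt_false (by simpa using hc)
            · obtain ⟨z, hz, rfl⟩ := List.mem_map.mp hy
              refine pvLe_trans ?_ hR
              exact pvShift_mono _ _ (hbnd z (List.mem_cons.mpr (Or.inr hz)))
      rw [hkeep]
      rw [show ((h1 : Int) - 1) * 10 ^ t.length + (10 ^ t.length - 1)
          = (pvP ((h1 - 1) :: List.replicate t.length 9)).2 from by rw [← hnines]; ring]
      rw [hds1, hds2, hmax]
      by_cases hc : pvLexLt (pvShift h1 t.length (pvMaxPairs (pvCands t)))
          (pvP ((h1 - 1) :: List.replicate t.length 9)) = true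
      · rw [if_pos hc, if_pos hc]
      · rw [if_neg hc, if_neg hc]

theorem solveB_char (n : Int) (hn : 0 ≤ n) :
    solve_alt n = (pvMaxPairs (pvCands (pvDigits n.toNat))).2 := by
  unfold solve_alt
  have h1 : n = ((n.toNat : Nat) : Int) := (Int.toNat_of_nonneg hn).symm
  rw [h1]
  exact pvMain _ _ (le_of_eq (by
    rw [pvToChars_int _ (Int.natCast_nonneg _), Int.toNat_natCast]
    simp [pvChars]))

-- ===== VERDICT (by name: the statement is the Claim_ definition above) =====
theorem solve_spec : Claim_equal_solve := by
  intro n _ hpre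
  unfold Spec_solve
  rw [solveA_char n hpre, solveB_char n hpre]
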